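-- pv_equiv track=rewrite | github.com/sveneggimann/SNIP | Python_Files/SNIP_functions.py | checkIfPathAreIdentical
-- ===== SOURCE A (Python) =====
-- def checkIfPathAreIdentical(tooLongPath, waytoclosestWWTP, network_ohneArchPath, network):
--     ''' This function checks if two path are identical. If no, remove all not itentical nodes from network.
--
--     Input:
--     tooLongPath                 -    List with wwtps
--     waytoclosestWWTP  -    ID
--     network_ohneArchPath        -    Network without added archPath
--     network                     -    Network
--
--     Ouput:
--     network                     -
--     '''
--     counter, notIdenticalNodes = 0, []
--
--     if len(tooLongPath) > len(waytoclosestWWTP):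
--         weiterCheck = 1
--     if len(tooLongPath) < len(waytoclosestWWTP):
--         weiterCheck = 2
--     if len(tooLongPath) == len(waytoclosestWWTP):
--         weiterCheck = None
--
--     for i in tooLongPath:
--         try:
--             if i == waytoclosestWWTP[counter]:
--                 counter += 1
--             else:
--                 if i not in network_ohneArchPath:
--                     notIdenticalNodes.append(i)
--         except IndexError:
--             break
--
--     # If tooLongPath is longer, search remaining not check nodes where they were not in the network
--     if weiterCheck == 1:
--         for i in tooLongPath[len(waytoclosestWWTP):]:
--             if i not in network_ohneArchPath:
--                 notIdenticalNodes.append(i)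
--
--     # Remove all notIdenticalNodes as they are not connected (remove from network)
--     for i in notIdenticalNodes:
--         for z in network:
--             if network[z] != ():
--                 if network[z][0] == i:
--                     del network[z]
--                     break
--
--     for i in notIdenticalNodes:
--         try:
--             del network[i]
--         except KeyError:
--             _ = 0  # already deleted
--     return network
-- ===== SOURCE B (Python) =====
-- def checkIfPathAreIdentical(tooLongPath, waytoclosestWWTP, network_ohneArchPath, network):
--     """Same result as A (mutates `network` in place, like A), but the quadratic
--     delete-by-rescanning phase is replaced by one counting pass and one sweep."""
--     m = len(waytoclosestWWTP)
--     nodes = []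
--     counter = 0
--     for i in tooLongPath:
--         if counter == m:
--             break
--         if i == waytoclosestWWTP[counter]:
--             counter += 1
--         elif i not in network_ohneArchPath:
--             nodes.append(i)
--     for i in tooLongPath[m:]:
--         if i not in network_ohneArchPath:
--             nodes.append(i)
--
--     # how many entries per first-element have to disappear
--     cnt = {}
--     for i in nodes:
--         cnt[i] = cnt.get(i, 0) + 1
--     # one sweep over the network: doom the first cnt[h] keys whose value starts with h
--     doomed = set()
--     seen = {}
--     for k, v in network.items():
--         if v != ():
--             h = v[0]
--             s = seen.get(h, 0)
--             if s < cnt.get(h, 0):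
--                 doomed.add(k)
--                 seen[h] = s + 1
--     # keys equal to a non-identical node disappear as well
--     for i in cnt:
--         if i in network:
--             doomed.add(i)
--     for k in doomed:
--         del network[k]
--     return network
-- ===== Notes on version B (the rewrite author's own statement) =====
-- stated objective: faster
-- what changed: A deletes each non-identical node by rescanning the whole network dict (and deletes again by key), which is O(N*M); B counts the non-identical nodes once, marks the doomed keys in a single sweep over the network (first cnt[h] keys whose value starts with h, plus keys equal to a node) and deletes them in one pass.
import Mathlib
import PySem

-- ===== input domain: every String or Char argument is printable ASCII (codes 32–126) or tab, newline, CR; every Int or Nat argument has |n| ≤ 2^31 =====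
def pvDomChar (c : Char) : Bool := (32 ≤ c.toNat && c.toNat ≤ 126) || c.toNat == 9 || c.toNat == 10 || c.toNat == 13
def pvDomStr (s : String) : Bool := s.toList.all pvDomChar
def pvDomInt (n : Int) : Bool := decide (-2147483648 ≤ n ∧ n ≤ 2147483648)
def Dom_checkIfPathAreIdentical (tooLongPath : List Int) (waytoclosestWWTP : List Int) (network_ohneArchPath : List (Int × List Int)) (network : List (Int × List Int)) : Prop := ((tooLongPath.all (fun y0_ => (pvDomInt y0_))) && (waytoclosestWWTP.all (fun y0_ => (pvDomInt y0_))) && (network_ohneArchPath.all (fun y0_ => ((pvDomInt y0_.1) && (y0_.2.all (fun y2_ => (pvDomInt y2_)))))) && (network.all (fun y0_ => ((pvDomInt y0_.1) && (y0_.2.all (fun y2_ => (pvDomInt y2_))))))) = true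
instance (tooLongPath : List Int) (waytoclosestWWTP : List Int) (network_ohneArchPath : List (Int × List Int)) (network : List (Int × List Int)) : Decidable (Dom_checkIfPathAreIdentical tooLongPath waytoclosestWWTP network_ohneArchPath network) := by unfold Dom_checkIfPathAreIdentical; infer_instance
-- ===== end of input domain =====

-- B replaces A's quadratic delete-by-rescanning phase by one counting pass and a single
-- sweep over the network; like A, the Python B mutates `network` in place and returns it
-- (the equivalence proved here is about the returned dict, which is also the final state).

-- ===== PORT A =====
-- the inner 'for z in network: if network[z] != (): if network[z][0] == i: del network[z]; break'
def pvFindDoomedKey (i : Int) : List (Int × List Int) → Option Int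
  | [] => none
  | (k, v) :: rest =>
    if v = [] then pvFindDoomedKey i rest
    else if v.head? = some i then some k
    else pvFindDoomedKey i rest

-- the first 'for i in tooLongPath' loop; the 'except IndexError: break' is the none-case of pyGet?
def pvNotIdLoopA (way : List Int) (netA : PySem.Dict Int (List Int)) :
    List Int → Int → List Int → List Int
  | [], _, acc => acc
  | i :: rest, counter, acc =>
    match PySem.List.pyGet? way counter with
    | none => acc
    | some w =>
      if i = w then pvNotIdLoopA way netA rest (counter + 1) acc
      else if netA.contains i then pvNotIdLoopA way netA rest counter acc
      else pvNotIdLoopA way netA rest counter (acc ++ [i])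

def checkIfPathAreIdentical (tooLongPath : List Int) (waytoclosestWWTP : List Int) (network_ohneArchPath : List (Int × List Int)) (network : List (Int × List Int)) : List (Int × List Int) :=
  let netA := PySem.Dict.ofList network_ohneArchPath
  let net := PySem.Dict.ofList network
  let notId0 := pvNotIdLoopA waytoclosestWWTP netA tooLongPath 0 []
  -- 'if weiterCheck == 1' is exactly len(tooLongPath) > len(waytoclosestWWTP);
  -- tooLongPath[len(waytoclosestWWTP):] with a nonnegative start is List.drop (exact)
  let notId :=
    if waytoclosestWWTP.length < tooLongPath.length then
      (tooLongPath.drop waytoclosestWWTP.length).foldl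
        (fun acc i => if netA.contains i then acc else acc ++ [i]) notId0
    else notId0
  let net1 := notId.foldl (fun d i =>
      match pvFindDoomedKey i d.items with
      | some z => d.erase z
      | none => d) net
  -- 'del network[i]' with KeyError swallowed: erase is a no-op on a missing key
  let net2 := notId.foldl (fun d i => d.erase i) net1
  net2.items

-- ===== PORT B =====
-- Source B's first loop: explicit 'if counter == m: break' guard; the index is then in range,
-- so getD with an arbitrary default is exact
def pvNotIdLoopB (way : List Int) (netA : PySem.Dict Int (List Int)) :
    List Int → Nat → List Int → List Int
  | [], _, acc => acc
  | i :: rest, c, acc =>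
    if c = way.length then acc
    else if i = way.getD c 0 then pvNotIdLoopB way netA rest (c + 1) acc
    else if netA.contains i then pvNotIdLoopB way netA rest c acc
    else pvNotIdLoopB way netA rest c (acc ++ [i])

def checkIfPathAreIdentical_alt (tooLongPath : List Int) (waytoclosestWWTP : List Int) (network_ohneArchPath : List (Int × List Int)) (network : List (Int × List Int)) : List (Int × List Int) :=
  let netA := PySem.Dict.ofList network_ohneArchPath
  let net := PySem.Dict.ofList network
  let m := waytoclosestWWTP.length
  let nodes0 := pvNotIdLoopB waytoclosestWWTP netA tooLongPath 0 []
  let nodes := (tooLongPath.drop m).foldl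
      (fun acc i => if netA.contains i then acc else acc ++ [i]) nodes0
  let cnt : PySem.Dict Int Int :=
    nodes.foldl (fun d i => d.insert i (d.getD i 0 + 1)) PySem.Dict.empty
  let scan := net.items.foldl
      (fun (st : PySem.Set Int × PySem.Dict Int Int) kv =>
        match kv.2 with
        | [] => st
        | h :: _ =>
          let s := st.2.getD h 0
          if s < cnt.getD h 0 then (PySem.Set.add st.1 kv.1, st.2.insert h (s + 1)) else st)
      (([] : PySem.Set Int), PySem.Dict.empty)
  let doomed := cnt.keys.foldl
      (fun s i => if net.contains i then PySem.Set.add s i else s) scan.1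
  (doomed.foldl (fun d k => d.erase k) net).items

-- ===== PRECONDITION & SPEC =====
def Spec_checkIfPathAreIdentical (tooLongPath : List Int) (waytoclosestWWTP : List Int) (network_ohneArchPath : List (Int × List Int)) (network : List (Int × List Int)) (out : List (Int × List Int)) : Prop := out = checkIfPathAreIdentical_alt tooLongPath waytoclosestWWTP network_ohneArchPath network
instance (tooLongPath : List Int) (waytoclosestWWTP : List Int) (network_ohneArchPath : List (Int × List Int)) (network : List (Int × List Int)) (out : List (Int × List Int)) : Decidable (Spec_checkIfPathAreIdentical tooLongPath waytoclosestWWTP network_ohneArchPath network out) := by unfold Spec_checkIfPathAreIdentical; infer_instance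

-- ===== CLAIM (what is proved, stated in full; the proofs are below) =====
def Claim_equal_checkIfPathAreIdentical : Prop := ∀ (tooLongPath : List Int) (waytoclosestWWTP : List Int) (network_ohneArchPath : List (Int × List Int)) (network : List (Int × List Int)), Dom_checkIfPathAreIdentical tooLongPath waytoclosestWWTP network_ohneArchPath network → Spec_checkIfPathAreIdentical tooLongPath waytoclosestWWTP network_ohneArchPath network (checkIfPathAreIdentical tooLongPath waytoclosestWWTP network_ohneArchPath network)

-- ===== LEMMAS AND PROOFS =====

-- proof-side model of A's sequential first deletion phase, done in one scan:
-- keep an item unless its value's head h still has budget (seen h < cnt h)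
def pvKeep (cnt : Int → Int) : List (Int × List Int) → (Int → Int) → List (Int × List Int)
  | [], _ => []
  | (k, v) :: rest, seen =>
    match v with
    | [] => (k, v) :: pvKeep cnt rest seen
    | h :: _ =>
      if seen h < cnt h then pvKeep cnt rest (fun x => if x = h then seen x + 1 else seen x)
      else (k, v) :: pvKeep cnt rest seen

def pvEraseFirst (i : Int) : List (Int × List Int) → List (Int × List Int)
  | [] => []
  | (k, v) :: rest =>
    if v = [] then (k, v) :: pvEraseFirst i rest
    else if v.head? = some i then rest
    else (k, v) :: pvEraseFirst i rest

-- the two first loops agree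
lemma pvLoopAB (way : List Int) (netA : PySem.Dict Int (List Int)) :
    ∀ (rest : List Int) (c : Nat) (acc : List Int), c ≤ way.length →
      pvNotIdLoopA way netA rest (c : Int) acc = pvNotIdLoopB way netA rest c acc := by
  intro rest
  induction rest with
  | nil => intro c acc _; rfl
  | cons i rest ih =>
    intro c acc hc
    by_cases hce : c = way.length
    · have hg : PySem.List.pyGet? way (c : Int) = none := by
        simp [PySem.List.pyGet?, PySem.List.pyIdx?]; omega
      simp [pvNotIdLoopA, pvNotIdLoopB, hce]
    · have hlt : c < way.length := lt_of_le_of_ne hc hce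
      have hg : PySem.List.pyGet? way (c : Int) = some way[c] := by
        simp [PySem.List.pyGet?, PySem.List.pyIdx?, hlt]
      have hgd : way.getD c 0 = way[c] := List.getD_eq_getElem way 0 hlt
      simp only [pvNotIdLoopA, pvNotIdLoopB, hg, if_neg hce, hgd]
      by_cases hi : i = way[c]
      · rw [if_pos hi, if_pos hi]
        have : ((c : Int) + 1) = ((c + 1 : Nat) : Int) := by push_cast; ring
        rw [this, ih (c + 1) acc (by omega)]
      · rw [if_neg hi, if_neg hi]
        by_cases hn : netA.contains i = true
        · rw [if_pos hn, if_pos hn, ih c acc hc]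
        · rw [if_neg hn, if_neg hn, ih c _ hc]

lemma pvKeep_zero (items : List (Int × List Int)) (seen : Int → Int)
    (h0 : ∀ x, 0 ≤ seen x) : pvKeep (fun _ => 0) items seen = items := by
  induction items generalizing seen with
  | nil => rfl
  | cons kv rest ih =>
    obtain ⟨k, v⟩ := kv
    cases v with
    | nil => simp [pvKeep, ih seen h0]
    | cons h t =>
      simp only [pvKeep]
      rw [if_neg (by have := h0 h; omega)]
      simp [ih seen h0]

lemma pvKeep_shift (i : Int) (cnt : Int → Int) :
    ∀ (items : List (Int × List Int)) (seen : Int → Int),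
      pvKeep (fun x => if x = i then cnt x + 1 else cnt x) items
        (fun x => if x = i then seen x + 1 else seen x) = pvKeep cnt items seen := by
  intro items
  induction items with
  | nil => intro seen; rfl
  | cons kv rest ih =>
    intro seen
    obtain ⟨k, v⟩ := kv
    cases v with
    | nil => simp [pvKeep, ih seen]
    | cons h t =>
      simp only [pvKeep]
      by_cases hhi : h = i
      · rw [if_pos hhi]
        by_cases hlt : seen h < cnt h
        · rw [if_pos (by rw [if_pos hhi]; omega), if_pos hlt]
          have hfun : (fun x => if x = h then (if x = i then seen x + 1 else seen x) + 1
                        else (if x = i then seen x + 1 else seen x))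
              = (fun x => if x = i then (fun y => if y = h then seen y + 1 else seen y) x + 1
                        else (fun y => if y = h then seen y + 1 else seen y) x) := by
            funext x
            by_cases hx : x = h <;> by_cases hx2 : x = i <;> simp [hx, hx2] <;> simp_all
          rw [hfun, ih]
        · rw [if_neg (by rw [if_pos hhi]; omega), if_neg hlt, ih]
      · rw [if_neg hhi]
        by_cases hlt : seen h < cnt h
        · rw [if_pos (by rw [if_neg hhi]; omega), if_pos hlt]
          have hfun : (fun x => if x = h then (if x = i then seen x + 1 else seen x) + 1
                        else (if x = i then seen x + 1 else seen x))
              = (fun x => if x = i then (fun y => if y = h then seen y + 1 else seen y) x + 1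
                        else (fun y => if y = h then seen y + 1 else seen y) x) := by
            funext x
            by_cases hx : x = h <;> by_cases hx2 : x = i <;> simp [hx, hx2] <;> simp_all
          rw [hfun, ih]
        · rw [if_neg (by rw [if_neg hhi]; omega), if_neg hlt, ih]

lemma pvKeep_erase (i : Int) (cnt : Int → Int) (hc : 0 ≤ cnt i) :
    ∀ (items : List (Int × List Int)) (seen : Int → Int), seen i = 0 →
      pvKeep (fun x => if x = i then cnt x + 1 else cnt x) items seen
        = pvKeep cnt (pvEraseFirst i items) seen := by
  intro items
  induction items with
  | nil => intro seen _; rfl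
  | cons kv rest ih =>
    intro seen hs
    obtain ⟨k, v⟩ := kv
    cases v with
    | nil =>
      simp [pvEraseFirst, pvKeep, ih seen hs]
    | cons h t =>
      by_cases hhi : h = i
      · subst hhi
        simp only [pvEraseFirst]
        rw [if_neg (by simp), if_pos (by simp)]
        simp only [pvKeep]
        rw [if_pos (by simp only [if_true]; omega)]
        exact pvKeep_shift h cnt rest seen
      · simp only [pvEraseFirst]
        rw [if_neg (by simp), if_neg (by simp [hhi])]
        simp only [pvKeep]
        beta_reduce
        rw [if_neg hhi]
        by_cases hlt : seen h < cnt h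
        · rw [if_pos hlt, if_pos hlt]
          exact ih _ (by have hne : ¬ i = h := fun hh => hhi hh.symm; simp [hne, hs])
        · rw [if_neg hlt, if_neg hlt, ih seen hs]

lemma pvFind_none (i : Int) : ∀ (l : List (Int × List Int)),
    pvFindDoomedKey i l = none → pvEraseFirst i l = l := by
  intro l
  induction l with
  | nil => intro _; rfl
  | cons kv rest ih =>
    intro hf
    obtain ⟨k, v⟩ := kv
    by_cases hv : v = []
    · simp only [pvFindDoomedKey, if_pos hv] at hf
      simp [pvEraseFirst, hv, ih hf]
    · by_cases hh : v.head? = some i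
      · simp [pvFindDoomedKey, hv, hh] at hf
      · simp only [pvFindDoomedKey, if_neg hv, if_neg hh] at hf
        simp [pvEraseFirst, hv, hh, ih hf]

lemma pvFind_mem (i : Int) : ∀ (l : List (Int × List Int)) (z : Int),
    pvFindDoomedKey i l = some z → z ∈ l.map Prod.fst := by
  intro l
  induction l with
  | nil => intro z hf; simp [pvFindDoomedKey] at hf
  | cons kv rest ih =>
    intro z hf
    obtain ⟨k, v⟩ := kv
    by_cases hv : v = []
    · simp only [pvFindDoomedKey, if_pos hv] at hf
      simp [ih z hf]
    · by_cases hh : v.head? = some i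
      · simp only [pvFindDoomedKey, if_neg hv, if_pos hh, Option.some.injEq] at hf
        simp [hf]
      · simp only [pvFindDoomedKey, if_neg hv, if_neg hh] at hf
        simp [ih z hf]

lemma pvFind_some (i : Int) : ∀ (l : List (Int × List Int)) (z : Int),
    (l.map Prod.fst).Nodup → pvFindDoomedKey i l = some z →
      l.filter (fun p => !(p.1 == z)) = pvEraseFirst i l := by
  intro l
  induction l with
  | nil => intro z _ hf; simp [pvFindDoomedKey] at hf
  | cons kv rest ih =>
    intro z hnd hf
    obtain ⟨k, v⟩ := kv
    simp only [List.map_cons, List.nodup_cons] at hnd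
    by_cases hv : v = []
    · simp only [pvFindDoomedKey, if_pos hv] at hf
      have hz := pvFind_mem i rest z hf
      have hkz : ¬ (k = z) := fun e => hnd.1 (e ▸ hz)
      simp [pvEraseFirst, hv, hkz, ih z hnd.2 hf]
    · by_cases hh : v.head? = some i
      · simp only [pvFindDoomedKey, if_neg hv, if_pos hh, Option.some.injEq] at hf
        subst hf
        simp only [pvEraseFirst, if_neg hv, if_pos hh]
        rw [List.filter_cons_of_neg (by simp)]
        apply List.filter_eq_self.mpr
        intro p hp
        have hmem : p.1 ∈ rest.map Prod.fst := List.mem_map_of_mem hp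
        have hne : ¬ (p.1 = k) := fun e => hnd.1 (e ▸ hmem)
        simp [hne]
      · simp only [pvFindDoomedKey, if_neg hv, if_neg hh] at hf
        have hz := pvFind_mem i rest z hf
        have hkz : ¬ (k = z) := fun e => hnd.1 (e ▸ hz)
        simp [pvEraseFirst, hv, hh, hkz, ih z hnd.2 hf]

lemma pvEraseFirst_sublist (i : Int) : ∀ (l : List (Int × List Int)),
    (pvEraseFirst i l).Sublist l := by
  intro l
  induction l with
  | nil => simp [pvEraseFirst]
  | cons kv rest ih =>
    obtain ⟨k, v⟩ := kv
    by_cases hv : v = []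
    · simpa [pvEraseFirst, hv] using List.Sublist.cons₂ (k, v) ih
    · by_cases hh : v.head? = some i
      · simp [pvEraseFirst, hv, hh]
      · simpa [pvEraseFirst, hv, hh] using List.Sublist.cons₂ (k, v) ih

lemma pvEraseFirst_nodup (i : Int) : ∀ (l : List (Int × List Int)),
    (l.map Prod.fst).Nodup → ((pvEraseFirst i l).map Prod.fst).Nodup := by
  intro l hnd
  exact List.Nodup.sublist ((pvEraseFirst_sublist i l).map Prod.fst) hnd

-- A's first deletion phase is pvKeep with cnt = occurrence counts of the node list
lemma pvPhaseA : ∀ (ns : List Int) (d : PySem.Dict Int (List Int)),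
    (d.items.map Prod.fst).Nodup →
    ((ns.foldl (fun d i =>
        match pvFindDoomedKey i d.items with
        | some z => d.erase z
        | none => d) d).items)
      = pvKeep (fun h => ((ns.count h : Nat) : Int)) d.items (fun _ => 0) := by
  intro ns
  induction ns with
  | nil =>
    intro d hnd
    simp only [List.foldl_nil]
    have hcnt : (fun h => ((([] : List Int).count h : Nat) : Int)) = fun _ => (0 : Int) := by
      funext x; simp
    rw [hcnt, pvKeep_zero d.items _ (fun _ => le_refl 0)]
  | cons j ns ih =>
    intro d hnd
    have hcnt : (fun h => (((j :: ns).count h : Nat) : Int))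
        = (fun x => if x = j then ((ns.count x : Nat) : Int) + 1 else ((ns.count x : Nat) : Int)) := by
      funext x
      by_cases hx : x = j
      · simp [hx]
      · have hx2 : ¬ j = x := fun hh => hx hh.symm
        simp [hx, hx2]
    simp only [List.foldl_cons]
    cases hf : pvFindDoomedKey j d.items with
    | none =>
      rw [ih d hnd]
      have he : pvEraseFirst j d.items = d.items := pvFind_none j d.items hf
      have hk := pvKeep_erase j (fun h => ((ns.count h : Nat) : Int))
        (Int.natCast_nonneg _) d.items (fun _ => 0) rfl
      rw [he] at hk
      rw [hcnt, hk]
    | some z =>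
      have hfe : (d.erase z).items = pvEraseFirst j d.items := by
        simp only [PySem.Dict.erase]
        exact pvFind_some j d.items z hnd hf
      have hnd' : ((d.erase z).items.map Prod.fst).Nodup := by
        rw [hfe]; exact pvEraseFirst_nodup j d.items hnd
      rw [ih _ hnd', hfe]
      have hk := pvKeep_erase j (fun h => ((ns.count h : Nat) : Int))
        (Int.natCast_nonneg _) d.items (fun _ => 0) rfl
      rw [hcnt, hk]

-- erasing every key of L is one filter
lemma pvFoldErase : ∀ (L : List Int) (d : PySem.Dict Int (List Int)),
    (L.foldl (fun d k => d.erase k) d).items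
      = d.items.filter (fun kv => decide (kv.1 ∉ L)) := by
  intro L
  induction L with
  | nil => intro d; simp
  | cons k L ih =>
    intro d
    simp only [List.foldl_cons]
    rw [ih (d.erase k)]
    simp only [PySem.Dict.erase]
    rw [List.filter_filter]
    apply List.filter_congr
    intro p _
    by_cases h1 : p.1 = k <;> by_cases h2 : p.1 ∈ L <;> simp [h1, h2]

-- B's sweep: membership and lockstep with pvKeep
def pvStepB (cnt : PySem.Dict Int Int)
    (st : PySem.Set Int × PySem.Dict Int Int) (kv : Int × List Int) :
    PySem.Set Int × PySem.Dict Int Int :=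
  match kv.2 with
  | [] => st
  | h :: _ =>
    let s := st.2.getD h 0
    if s < cnt.getD h 0 then (PySem.Set.add st.1 kv.1, st.2.insert h (s + 1)) else st

lemma pvStepB_subset (cnt : PySem.Dict Int Int) :
    ∀ (items : List (Int × List Int)) (st : PySem.Set Int × PySem.Dict Int Int) (x : Int),
      x ∈ (items.foldl (pvStepB cnt) st).1 → x ∈ st.1 ∨ x ∈ items.map Prod.fst := by
  intro items
  induction items with
  | nil => intro st x h; exact Or.inl h
  | cons kv rest ih =>
    intro st x h
    simp only [List.foldl_cons] at h
    rcases ih (pvStepB cnt st kv) x h with h1 | h1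
    · obtain ⟨k, v⟩ := kv
      cases v with
      | nil => exact Or.inl h1
      | cons hd tl =>
        simp only [pvStepB] at h1
        split at h1
        · rw [PySem.Set.mem_add] at h1
          rcases h1 with h1 | h1
          · exact Or.inl h1
          · right; simp [h1]
        · exact Or.inl h1
    · right
      simp only [List.map_cons, List.mem_cons]
      exact Or.inr (by simpa using h1)

lemma pvStepB_mono (cnt : PySem.Dict Int Int) :
    ∀ (items : List (Int × List Int)) (st : PySem.Set Int × PySem.Dict Int Int) (x : Int),
      x ∈ st.1 → x ∈ (items.foldl (pvStepB cnt) st).1 := by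
  intro items
  induction items with
  | nil => intro st x h; exact h
  | cons kv rest ih =>
    intro st x h
    simp only [List.foldl_cons]
    apply ih
    obtain ⟨k, v⟩ := kv
    cases v with
    | nil => exact h
    | cons hd tl =>
      simp only [pvStepB]
      split
      · rw [PySem.Set.mem_add]; exact Or.inl h
      · exact h

lemma pvLockstep (cnt : PySem.Dict Int Int) :
    ∀ (items : List (Int × List Int)) (S0 : PySem.Set Int) (seenD : PySem.Dict Int Int),
      (items.map Prod.fst).Nodup → (∀ kv ∈ items, kv.1 ∉ S0) →
      items.filter (fun kv => decide (kv.1 ∉ (items.foldl (pvStepB cnt) (S0, seenD)).1))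
        = pvKeep (fun h => cnt.getD h 0) items (fun h => seenD.getD h 0) := by
  intro items
  induction items with
  | nil => intro S0 seenD _ _; rfl
  | cons kv rest ih =>
    intro S0 seenD hnd hdisj
    obtain ⟨k, v⟩ := kv
    simp only [List.map_cons, List.nodup_cons] at hnd
    have hkS0 : k ∉ S0 := hdisj (k, v) (List.mem_cons_self ..)
    have hdisj' : ∀ kv ∈ rest, kv.1 ∉ S0 := fun kv h => hdisj kv (List.mem_cons_of_mem _ h)
    simp only [List.foldl_cons, List.filter_cons]
    cases v with
    | nil =>
      have hstep : pvStepB cnt (S0, seenD) (k, []) = (S0, seenD) := rfl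
      simp only [hstep]
      have hk : k ∉ (rest.foldl (pvStepB cnt) (S0, seenD)).1 := by
        intro hmem
        rcases pvStepB_subset cnt rest (S0, seenD) k hmem with h | h
        · exact hkS0 h
        · exact hnd.1 h
      rw [if_pos (decide_eq_true hk)]
      simp only [pvKeep]
      rw [ih S0 seenD hnd.2 hdisj']
    | cons hd tl =>
      by_cases hcond : seenD.getD hd 0 < cnt.getD hd 0
      · have hstep : pvStepB cnt (S0, seenD) (k, hd :: tl)
            = (PySem.Set.add S0 k, seenD.insert hd (seenD.getD hd 0 + 1)) := by
          simp [pvStepB, hcond]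
        simp only [hstep]
        have hk : k ∈ (rest.foldl (pvStepB cnt)
            (PySem.Set.add S0 k, seenD.insert hd (seenD.getD hd 0 + 1))).1 := by
          exact pvStepB_mono cnt rest _ k (by rw [PySem.Set.mem_add]; exact Or.inr rfl)
        rw [if_neg (by simpa using hk)]
        simp only [pvKeep]
        rw [if_pos hcond]
        have hdisj2 : ∀ kv ∈ rest, kv.1 ∉ PySem.Set.add S0 k := by
          intro kv h
          rw [PySem.Set.mem_add]
          rintro (h1 | h1)
          · exact hdisj' kv h h1
          · exact hnd.1 (h1 ▸ List.mem_map_of_mem h)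
        rw [ih (PySem.Set.add S0 k) (seenD.insert hd (seenD.getD hd 0 + 1)) hnd.2 hdisj2]
        congr 1
        funext x
        by_cases hx : x = hd <;> simp [PySem.Dict.getD_insert, hx]
      · have hstep : pvStepB cnt (S0, seenD) (k, hd :: tl) = (S0, seenD) := by
          simp [pvStepB, hcond]
        simp only [hstep]
        have hk : k ∉ (rest.foldl (pvStepB cnt) (S0, seenD)).1 := by
          intro hmem
          rcases pvStepB_subset cnt rest (S0, seenD) k hmem with h | h
          · exact hkS0 h
          · exact hnd.1 h
        rw [if_pos (decide_eq_true hk)]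
        simp only [pvKeep]
        rw [if_neg hcond]
        rw [ih S0 seenD hnd.2 hdisj']

lemma pvDoomed2_mem (net : PySem.Dict Int (List Int)) :
    ∀ (ks : List Int) (S : PySem.Set Int) (x : Int),
      (x ∈ ks.foldl (fun s i => if net.contains i then PySem.Set.add s i else s) S)
        ↔ (x ∈ S ∨ (x ∈ ks ∧ net.contains x = true)) := by
  intro ks
  induction ks with
  | nil => intro S x; simp
  | cons k ks ih =>
    intro S x
    simp only [List.foldl_cons]
    rw [ih]
    by_cases hck : net.contains k = true
    · rw [if_pos hck, PySem.Set.mem_add]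
      by_cases hxk : x = k <;> simp [hxk, hck]
    · rw [if_neg hck]
      by_cases hxk : x = k <;> simp_all

-- ===== VERDICT (by name: the statement is the Claim_ definition above) =====
theorem checkIfPathAreIdentical_spec : Claim_equal_checkIfPathAreIdentical := by
  intro tooLongPath waytoclosestWWTP network_ohneArchPath network _
  unfold Spec_checkIfPathAreIdentical
  simp only [checkIfPathAreIdentical, checkIfPathAreIdentical_alt]
  set netA := PySem.Dict.ofList network_ohneArchPath with hnetA
  set net := PySem.Dict.ofList network with hnet
  have hnd : (net.items.map Prod.fst).Nodup := PySem.Dict.nodup_keys_ofList network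
  have hloop : pvNotIdLoopA waytoclosestWWTP netA tooLongPath 0 []
      = pvNotIdLoopB waytoclosestWWTP netA tooLongPath 0 [] := by
    have h := pvLoopAB waytoclosestWWTP netA tooLongPath 0 [] (Nat.zero_le _)
    simpa using h
  set nodes := (tooLongPath.drop waytoclosestWWTP.length).foldl
      (fun acc i => if netA.contains i = true then acc else acc ++ [i])
      (pvNotIdLoopB waytoclosestWWTP netA tooLongPath 0 []) with hnodes
  have hif : (if waytoclosestWWTP.length < tooLongPath.length then
        (tooLongPath.drop waytoclosestWWTP.length).foldl
          (fun acc i => if netA.contains i = true then acc else acc ++ [i])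
          (pvNotIdLoopA waytoclosestWWTP netA tooLongPath 0 [])
      else pvNotIdLoopA waytoclosestWWTP netA tooLongPath 0 []) = nodes := by
    by_cases hlen : waytoclosestWWTP.length < tooLongPath.length
    · rw [if_pos hlen, hloop]
    · rw [if_neg hlen, hloop, hnodes, List.drop_eq_nil_of_le (by omega), List.foldl_nil]
  rw [hif]
  rw [pvFoldErase nodes, pvPhaseA nodes net hnd]
  -- B side
  set cntD : PySem.Dict Int Int :=
    nodes.foldl (fun d i => d.insert i (d.getD i 0 + 1)) PySem.Dict.empty with hcntD
  have hstepB : (fun (st : PySem.Set Int × PySem.Dict Int Int) (kv : Int × List Int) =>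
      match kv.2 with
      | [] => st
      | h :: _ =>
        let s := st.2.getD h 0
        if s < cntD.getD h 0 then (PySem.Set.add st.1 kv.1, st.2.insert h (s + 1)) else st)
      = pvStepB cntD := rfl
  rw [hstepB]
  set S1 := (net.items.foldl (pvStepB cntD) (([] : PySem.Set Int), PySem.Dict.empty)).1 with hS1
  set doomed := cntD.keys.foldl
      (fun s i => if net.contains i = true then PySem.Set.add s i else s) S1 with hdoomed
  rw [pvFoldErase doomed]
  -- lockstep: A's pvKeep form is a single filter over net.items
  have hcntF : (fun h => cntD.getD h (0 : Int)) = fun h => ((nodes.count h : Nat) : Int) := by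
    funext x
    rw [hcntD, PySem.Dict.getD_foldl_insert_add_one]
    simp [PySem.Dict.getD_empty]
  have hseen0 : (fun h => (PySem.Dict.empty : PySem.Dict Int Int).getD h 0) = fun _ => (0 : Int) := by
    funext x; simp [PySem.Dict.getD_empty]
  have hlock := pvLockstep cntD net.items [] PySem.Dict.empty hnd (by simp)
  rw [hcntF, hseen0] at hlock
  rw [← hlock, List.filter_filter]
  -- membership facts
  have hkeys : cntD.keys = PySem.Set.ofList nodes := by
    rw [hcntD, PySem.Dict.keys_foldl_insert]
    simp [PySem.Dict.keys_empty, PySem.Set.update_nil_left]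
  apply (List.filter_congr _).symm
  intro kv hp
  have hcont : net.contains kv.1 = true := by
    simp only [PySem.Dict.contains, List.any_eq_true]
    exact ⟨kv, hp, by simp⟩
  have hmem := pvDoomed2_mem net cntD.keys S1 kv.1
  rw [hkeys, PySem.Set.mem_ofList] at hmem
  by_cases h1 : kv.1 ∈ S1 <;> by_cases h2 : kv.1 ∈ nodes <;>
    simp [hdoomed, hkeys, hmem, h1, h2, hcont] <;> exact h1
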